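-- pv_equiv track=rewrite | github.com/N34R20/Algoritmos_y_Estructuras_de_Datos_I | Python/Simulacro_Python/main.py | contar_traducciones_iguales
-- ===== SOURCE A (Python) =====
-- def contar_traducciones_iguales(ingles: dict, aleman: dict) -> int:
--     merge_dict = dict()
--
--     for key, value in ingles.items():
--         merge_dict[key] = list()
--         merge_dict[key].append(value)
--
--     for key, value in aleman.items():
--         if key not in merge_dict.keys():
--             merge_dict[key] = list()
--             merge_dict[key].append(value)
--         else:
--             merge_dict[key].append(value)
--
--     contador = 0
--
--     for value in merge_dict.values():
--         if len(value) == 2 and value[0] == value[1]: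
--             contador += 1
--     return contador
-- ===== SOURCE B (Python) =====
-- def contar_traducciones_iguales(ingles: dict, aleman: dict) -> int:
--     return sum(1 for clave, valor in ingles.items()
--                if clave in aleman and aleman[clave] == valor)
-- ===== Notes on version B (the rewrite author's own statement) =====
-- stated objective: simpler
-- what changed: Replaces A's three passes (build a merge dict of value-lists from ingles, extend it from aleman, then scan its values for length-2 equal pairs) by a single pass over ingles that counts keys present in aleman with an equal value, with no intermediate table.
import Mathlib
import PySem

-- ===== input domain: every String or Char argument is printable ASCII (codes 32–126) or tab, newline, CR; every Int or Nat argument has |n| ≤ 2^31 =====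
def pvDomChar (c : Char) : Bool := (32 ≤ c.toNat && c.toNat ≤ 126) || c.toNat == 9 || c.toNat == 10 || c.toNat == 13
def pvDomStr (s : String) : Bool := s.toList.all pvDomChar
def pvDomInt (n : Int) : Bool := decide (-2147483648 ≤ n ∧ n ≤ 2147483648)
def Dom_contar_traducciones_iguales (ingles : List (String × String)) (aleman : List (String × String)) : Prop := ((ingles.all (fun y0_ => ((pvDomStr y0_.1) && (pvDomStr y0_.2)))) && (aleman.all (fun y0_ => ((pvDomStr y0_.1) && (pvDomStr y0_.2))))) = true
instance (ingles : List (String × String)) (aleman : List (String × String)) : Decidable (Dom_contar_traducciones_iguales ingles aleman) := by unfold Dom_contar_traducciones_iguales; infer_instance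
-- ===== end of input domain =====

-- B replaces A's three passes (populate a merge dict of value-lists from both dicts, then scan its
-- values) by a single counting pass over ingles with direct lookups in aleman; objective: simpler.


-- ===== PORT A =====
def contar_traducciones_iguales (ingles : List (String × String)) (aleman : List (String × String)) : Int :=
  -- merge_dict = dict(); first loop over ingles.items()
  let merge1 : PySem.Dict String (List String) :=
    ingles.foldl (fun d kv => (d.insert kv.1 []).modify kv.1 [] (fun l => l ++ [kv.2])) PySem.Dict.empty
  -- second loop over aleman.items()
  let merge2 : PySem.Dict String (List String) :=
    aleman.foldl (fun d kv =>
      if d.contains kv.1 = false then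
        (d.insert kv.1 []).modify kv.1 [] (fun l => l ++ [kv.2])
      else
        d.modify kv.1 [] (fun l => l ++ [kv.2])) merge1
  -- contador loop over merge_dict.values()
  merge2.values.foldl (fun contador v =>
    if (v.length == 2 && (PySem.List.pyGet? v 0 == PySem.List.pyGet? v 1)) then contador + 1
    else contador) 0

-- ===== PORT B =====
def contar_traducciones_iguales_alt (ingles : List (String × String)) (aleman : List (String × String)) : Int :=
  (List.countP (fun kv =>
      (PySem.Dict.mk aleman).contains kv.1 && ((PySem.Dict.mk aleman).get? kv.1 == some kv.2))
    ingles : Nat)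

-- ===== PRECONDITION & SPEC =====
-- Pre_ excludes association lists with duplicate keys: they do not represent any Python dict
-- (both A's and B's parameters are dicts, whose keys are unique), and on such lists the two
-- ports' first-match/overwrite readings are both accidental.
def Pre_contar_traducciones_iguales (ingles : List (String × String)) (aleman : List (String × String)) : Prop :=
  (ingles.map Prod.fst).Nodup ∧ (aleman.map Prod.fst).Nodup
instance (ingles : List (String × String)) (aleman : List (String × String)) : Decidable (Pre_contar_traducciones_iguales ingles aleman) := by unfold Pre_contar_traducciones_iguales; infer_instance
def pvWitness_contar_traducciones_iguales : (List (String × String)) × (List (String × String)) :=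
  ([("sol", "sun"), ("luna", "moon")], [("sol", "sun"), ("mar", "sea")])

def Spec_contar_traducciones_iguales (ingles : List (String × String)) (aleman : List (String × String)) (out : Int) : Prop := out = contar_traducciones_iguales_alt ingles aleman
instance (ingles : List (String × String)) (aleman : List (String × String)) (out : Int) : Decidable (Spec_contar_traducciones_iguales ingles aleman out) := by unfold Spec_contar_traducciones_iguales; infer_instance

-- ===== CLAIM (what is proved, stated in full; the proofs are below) =====
def Claim_equal_contar_traducciones_iguales : Prop := ∀ (ingles : List (String × String)) (aleman : List (String × String)), Dom_contar_traducciones_iguales ingles aleman → Pre_contar_traducciones_iguales ingles aleman → Spec_contar_traducciones_iguales ingles aleman (contar_traducciones_iguales ingles aleman)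

-- ===== LEMMAS AND PROOFS =====

-- first-match lookup in a raw association list, i.e. the dict the list denotes
def pvLk (l : List (String × String)) (c : String) : Option String := (PySem.Dict.mk l).get? c

-- the option as the value-list it contributes to merge_dict
def pvOL : Option String → List String
  | some v => [v]
  | none   => []

theorem pvLk_cons (k v : String) (t : List (String × String)) (c : String) :
    pvLk ((k, v) :: t) c = if k = c then some v else pvLk t c := by
  simp [pvLk, PySem.Dict.get?_mk_cons]

-- A's first loop step collapses to a plain insert
theorem pvStep1_eq (d : PySem.Dict String (List String)) (k : String) (v : String) :
    (d.insert k []).modify k [] (fun l => l ++ [v]) = d.insert k [v] := by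
  simp [PySem.Dict.modify, PySem.Dict.getD_insert_self, PySem.Dict.insert_insert_self]

-- A's second loop step (with the first-step collapse applied) is a plain modify: both branches agree
theorem pvStep2_eq (d : PySem.Dict String (List String)) (k : String) (v : String) :
    (if d.contains k = false then d.insert k [v] else d.modify k [] (fun l => l ++ [v])) =
      d.modify k [] (fun l => l ++ [v]) := by
  by_cases h : d.contains k = false
  · rw [if_pos h]
    simp [PySem.Dict.modify, PySem.Dict.getD_of_not_contains d [] h]
  · rw [if_neg h]

-- a fold of inserts leaves keys outside the list untouched
theorem pvFold1_untouched (l : List (String × String)) (d : PySem.Dict String (List String))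
    (c : String) (h : c ∉ l.map Prod.fst) :
    (l.foldl (fun d kv => d.insert kv.1 [kv.2]) d).getD c [] = d.getD c [] := by
  induction l generalizing d with
  | nil => rfl
  | cons kv t ih =>
      simp only [List.map_cons, List.mem_cons, not_or] at h
      simp only [List.foldl_cons]
      rw [ih _ h.2, PySem.Dict.getD_insert_of_ne _ _ _ h.1]

-- value of A's first-phase dict at any key
theorem pvFold1_getD (l : List (String × String)) (d : PySem.Dict String (List String))
    (c : String) (hnd : (l.map Prod.fst).Nodup) :
    (l.foldl (fun d kv => d.insert kv.1 [kv.2]) d).getD c [] =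
      match pvLk l c with
      | some v => [v]
      | none => d.getD c [] := by
  induction l generalizing d with
  | nil => rfl
  | cons kv t ih =>
      obtain ⟨k, v⟩ := kv
      simp only [List.map_cons, List.nodup_cons] at hnd
      simp only [List.foldl_cons, pvLk_cons]
      by_cases hc : k = c
      · subst hc
        rw [pvFold1_untouched t _ k hnd.1, if_pos rfl, PySem.Dict.getD_insert_self]
      · rw [ih _ hnd.2, if_neg hc]
        cases pvLk t c with
        | some w => rfl
        | none => simp [PySem.Dict.getD_insert_of_ne _ _ _ (Ne.symm hc)]

-- the filtered aleman values are exactly the (unique) first match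
theorem pvFilter_eq (l : List (String × String)) (c : String) (hnd : (l.map Prod.fst).Nodup) :
    (l.filter (fun p => p.1 == c)).map (fun x => x.2) = pvOL (pvLk l c) := by
  induction l with
  | nil => rfl
  | cons kv t ih =>
      obtain ⟨k, v⟩ := kv
      simp only [List.map_cons, List.nodup_cons] at hnd
      rw [pvLk_cons]
      by_cases hc : k = c
      · have hflt : t.filter (fun p => p.1 == c) = [] := by
          apply List.filter_eq_nil_iff.mpr
          intro p hp hb
          exact hnd.1 (List.mem_map.mpr ⟨p, hp, by rw [beq_iff_eq.mp hb, hc]⟩)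
        simp [hc, hflt, pvOL]
      · rw [List.filter_cons_of_neg (by simpa using hc), ih hnd.2, if_neg hc]

-- pvLk is some exactly on the key list
theorem pvLk_none_iff (l : List (String × String)) (c : String) :
    pvLk l c = none ↔ c ∉ l.map Prod.fst := by
  have := PySem.Dict.get?_eq_none_iff_not_mem_keys (PySem.Dict.mk l) c
  simpa [pvLk, PySem.Dict.keys_mk] using this

-- pvLk of a member under nodup
theorem pvLk_of_mem (l : List (String × String)) (kv : String × String)
    (hnd : (l.map Prod.fst).Nodup) (hm : kv ∈ l) : pvLk l kv.1 = some kv.2 := by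
  have : ((PySem.Dict.mk l).keys).Nodup := by simpa [PySem.Dict.keys_mk] using hnd
  exact PySem.Dict.get?_of_mem_items (PySem.Dict.mk l) (by simpa using hm) this

-- the merged dict's value at any key, in terms of the two lookups
theorem pvMerge_getD (ingles aleman : List (String × String))
    (h1 : (ingles.map Prod.fst).Nodup) (h2 : (aleman.map Prod.fst).Nodup) (c : String) :
    (aleman.foldl (fun d kv => d.modify kv.1 [] (fun l => l ++ [kv.2]))
      (ingles.foldl (fun d kv => d.insert kv.1 [kv.2]) PySem.Dict.empty)).getD c [] =
      pvOL (pvLk ingles c) ++ pvOL (pvLk aleman c) := by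
  rw [PySem.Dict.getD_foldl_modify_append, pvFold1_getD _ _ _ h1, pvFilter_eq _ _ h2]
  cases pvLk ingles c with
  | some v => rfl
  | none => simp [pvOL, PySem.Dict.getD_empty]

-- the counting predicate over a merged value-list, in terms of the lookups
theorem pvPred_eq (o1 o2 : Option String) :
    ((pvOL o1 ++ pvOL o2).length == 2 &&
      (PySem.List.pyGet? (pvOL o1 ++ pvOL o2) 0 == PySem.List.pyGet? (pvOL o1 ++ pvOL o2) 1)) =
      match o1, o2 with
      | some a, some b => a == b
      | _, _ => false := by
  cases o1 <;> cases o2 <;> simp [pvOL, PySem.List.pyGet?, PySem.List.pyIdx?]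

-- two nodup lists with the same members (where the predicate holds) have the same countP
theorem pvCountP_eq_of_mem_iff (p : String → Bool) (l₁ l₂ : List String)
    (h₁ : l₁.Nodup) (h₂ : l₂.Nodup) (hm : ∀ c, p c = true → (c ∈ l₁ ↔ c ∈ l₂)) :
    l₁.countP p = l₂.countP p := by
  rw [List.countP_eq_length_filter, List.countP_eq_length_filter]
  rw [← List.toFinset_card_of_nodup (h₁.filter p), ← List.toFinset_card_of_nodup (h₂.filter p)]
  congr 1
  apply Finset.ext
  intro c
  simp only [List.mem_toFinset, List.mem_filter]
  constructor
  · rintro ⟨hc, hp⟩; exact ⟨(hm c hp).mp hc, hp⟩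
  · rintro ⟨hc, hp⟩; exact ⟨(hm c hp).mpr hc, hp⟩

-- ===== VERDICT (by name: the statement is the Claim_ definition above) =====
theorem contar_traducciones_iguales_spec : Claim_equal_contar_traducciones_iguales := by
  intro ingles aleman _ hpre
  obtain ⟨h1, h2⟩ := hpre
  unfold Spec_contar_traducciones_iguales contar_traducciones_iguales contar_traducciones_iguales_alt
  simp only [pvStep1_eq]
  simp only [pvStep2_eq]
  set m2 := aleman.foldl (fun d kv => d.modify kv.1 [] (fun l => l ++ [kv.2]))
      (ingles.foldl (fun d kv => d.insert kv.1 [kv.2]) PySem.Dict.empty) with hm2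
  -- key-list facts about m2
  have hnd1 : (ingles.foldl (fun d kv => d.insert kv.1 [kv.2]) PySem.Dict.empty).keys.Nodup :=
    PySem.Dict.nodup_keys_foldl_insert_key ingles Prod.fst (fun _ kv => [kv.2]) _
      PySem.Dict.nodup_keys_empty
  have hndm2 : m2.keys.Nodup :=
    PySem.Dict.nodup_keys_foldl_modify_key aleman Prod.fst [] (fun _ kv l => l ++ [kv.2]) _ hnd1
  have hkeys1 : (ingles.foldl (fun d kv => d.insert kv.1 [kv.2]) PySem.Dict.empty).keys =
      PySem.Set.update PySem.Dict.empty.keys (ingles.map Prod.fst) :=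
    PySem.Dict.keys_foldl_insert_key ingles Prod.fst (fun _ kv => [kv.2]) _
  have hkeysm2 : m2.keys =
      PySem.Set.update (ingles.foldl (fun d kv => d.insert kv.1 [kv.2]) PySem.Dict.empty).keys
        (aleman.map Prod.fst) :=
    PySem.Dict.keys_foldl_modify_key aleman Prod.fst [] (fun _ kv l => l ++ [kv.2]) _
  have hmemm2 : ∀ c, c ∈ m2.keys ↔ c ∈ ingles.map Prod.fst ∨ c ∈ aleman.map Prod.fst := by
    intro c
    rw [hkeysm2, PySem.Set.mem_update, hkeys1, PySem.Set.mem_update]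
    simp [PySem.Dict.keys_empty]
  -- the counting loop is a countP over values
  rw [PySem.List.foldl_count_if]
  -- values as a map over keys, and the two-lookup characterisation
  rw [PySem.Dict.values_eq_map_keys m2 hndm2 [], List.countP_map]
  have hchar : ∀ c : String,
      ((fun v : List String => v.length == 2 &&
          (PySem.List.pyGet? v 0 == PySem.List.pyGet? v 1)) ∘ fun k => m2.getD k []) c =
      (match pvLk ingles c, pvLk aleman c with
        | some a, some b => a == b
        | _, _ => false) := by
    intro c
    have hg := pvMerge_getD ingles aleman h1 h2 c
    rw [← hm2] at hg
    simp only [Function.comp, hg, pvPred_eq]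
  rw [List.countP_congr (fun c _ => by rw [hchar c])]
  -- move the count from m2.keys to ingles' key list
  have hcnt : m2.keys.countP (fun c =>
        match pvLk ingles c, pvLk aleman c with
        | some a, some b => a == b
        | _, _ => false) =
      (ingles.map Prod.fst).countP (fun c =>
        match pvLk ingles c, pvLk aleman c with
        | some a, some b => a == b
        | _, _ => false) := by
    apply pvCountP_eq_of_mem_iff _ _ _ hndm2 h1
    intro c hp
    have hin : c ∈ ingles.map Prod.fst := by
      by_contra hni
      rw [← pvLk_none_iff] at hni
      simp [hni] at hp
    exact ⟨fun _ => hin, fun _ => (hmemm2 c).mpr (Or.inl hin)⟩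
  rw [hcnt, List.countP_map]
  -- pointwise agreement with B's predicate on members of ingles
  have hfin : ∀ kv ∈ ingles,
      ((fun c => match pvLk ingles c, pvLk aleman c with
        | some a, some b => a == b
        | _, _ => false) ∘ Prod.fst) kv = true ↔
      ((PySem.Dict.mk aleman).contains kv.1 &&
        ((PySem.Dict.mk aleman).get? kv.1 == some kv.2)) = true := by
    intro kv hkv
    rw [Function.comp_apply, pvLk_of_mem ingles kv h1 hkv]
    rw [PySem.Dict.contains_eq_isSome_get?]
    cases h : pvLk aleman kv.1 with
    | some b =>
        have h' : (PySem.Dict.mk aleman).get? kv.1 = some b := h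
        rw [h']
        constructor
        · intro hx
          simp only [Option.isSome_some, Bool.true_and, beq_iff_eq, Option.some_inj]
          exact (beq_iff_eq.mp hx).symm
        · intro hx
          simp only [Option.isSome_some, Bool.true_and, beq_iff_eq, Option.some_inj] at hx
          exact beq_iff_eq.mpr hx.symm
    | none =>
        have h' : (PySem.Dict.mk aleman).get? kv.1 = none := h
        rw [h']
        exact iff_of_false Bool.false_ne_true (by simp)
  rw [List.countP_congr hfin, zero_add]
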